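-- pv_equiv track=rewrite | github.com/Polyethylenekjc/Sparse-Transformer-In-Streamflow-Prediction | src/flood_transformer/map_analysis.py | _detect_station_id_col
-- ===== SOURCE A (Python) =====
-- from typing import Any, Dict, Iterable, List, Sequence, Tuple
--
-- def _detect_station_id_col(columns: Sequence[str]) -> str | None:
--     for c in columns:
--         low = c.lower()
--         if low in ["gauge_id", "gage_id", "station_id", "gaugeid", "id"]:
--             return c
--     for c in columns:
--         if "gauge" in c.lower() or "gage" in c.lower():
--             return c
--     return None
-- ===== SOURCE B (Python) =====
-- def _detect_station_id_col(columns):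
--     exact = ["gauge_id", "gage_id", "station_id", "gaugeid", "id"]
--     fallback = None
--     for c in columns:
--         low = c.lower()
--         if low in exact:
--             return c
--         if fallback is None and ("gauge" in low or "gage" in low):
--             fallback = c
--     return fallback
-- ===== Notes on version B (the rewrite author's own statement) =====
-- stated objective: alternative
-- what changed: Replaces A's two sequential scans (exact-name scan, then substring scan) with a single pass that returns immediately on an exact match and records only the first gauge/gage substring match in a fallback variable returned after the loop.
import Mathlib
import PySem

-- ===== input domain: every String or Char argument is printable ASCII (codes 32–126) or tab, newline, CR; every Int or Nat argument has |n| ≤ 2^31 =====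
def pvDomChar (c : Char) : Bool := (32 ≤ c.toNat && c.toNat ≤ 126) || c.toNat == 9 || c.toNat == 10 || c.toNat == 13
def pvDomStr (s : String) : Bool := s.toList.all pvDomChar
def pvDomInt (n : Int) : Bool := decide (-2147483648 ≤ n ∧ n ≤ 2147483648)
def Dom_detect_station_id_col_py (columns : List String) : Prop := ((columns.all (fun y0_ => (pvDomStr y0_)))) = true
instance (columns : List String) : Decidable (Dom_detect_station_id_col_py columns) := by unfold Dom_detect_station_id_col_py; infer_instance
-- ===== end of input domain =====

-- B replaces A's two sequential scans with a single pass keeping a first-substring-match fallback (objective: alternative decomposition, same cost).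

-- ===== PORT A =====
-- the exact-name list of A
def pvExactNames : List String := ["gauge_id", "gage_id", "station_id", "gaugeid", "id"]

-- first loop of A: return first column whose lowercase is in the exact-name list
def pvLoop1 : List String → Option String
  | [] => none
  | c :: rest =>
    if pvExactNames.contains (PySem.Str.lower c) then some c else pvLoop1 rest

-- second loop of A: return first column containing "gauge" or "gage" (lowercased)
def pvLoop2 : List String → Option String
  | [] => none
  | c :: rest =>
    if PySem.Str.isIn "gauge" (PySem.Str.lower c) || PySem.Str.isIn "gage" (PySem.Str.lower c)
    then some c else pvLoop2 rest

def detect_station_id_col_py (columns : List String) : Option String :=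
  match pvLoop1 columns with
  | some c => some c
  | none => pvLoop2 columns

-- ===== PORT B =====
-- single pass with a fallback accumulator (B's loop)
def pvAltLoop : List String → Option String → Option String
  | [], fallback => fallback
  | c :: rest, fallback =>
    let low := PySem.Str.lower c
    if pvExactNames.contains low then some c
    else pvAltLoop rest
      (if fallback.isNone && (PySem.Str.isIn "gauge" low || PySem.Str.isIn "gage" low)
       then some c else fallback)

def detect_station_id_col_py_alt (columns : List String) : Option String :=
  pvAltLoop columns none

-- ===== PRECONDITION & SPEC =====
def Spec_detect_station_id_col_py (columns : List String) (out : Option String) : Prop := out = detect_station_id_col_py_alt columns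
instance (columns : List String) (out : Option String) : Decidable (Spec_detect_station_id_col_py columns out) := by unfold Spec_detect_station_id_col_py; infer_instance

-- ===== CLAIM (what is proved, stated in full; the proofs are below) =====
def Claim_equal_detect_station_id_col_py : Prop := ∀ (columns : List String), Dom_detect_station_id_col_py columns → Spec_detect_station_id_col_py columns (detect_station_id_col_py columns)

-- ===== LEMMAS AND PROOFS =====

-- B's loop equals: exact-scan result, else the pending fallback, else A's substring scan
theorem pvAltLoop_eq (xs : List String) (fb : Option String) :
    pvAltLoop xs fb =
      match pvLoop1 xs with
      | some c => some c
      | none => match fb with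
                | some f => some f
                | none => pvLoop2 xs := by
  induction xs generalizing fb with
  | nil => cases fb <;> simp [pvAltLoop, pvLoop1, pvLoop2]
  | cons c rest ih =>
    by_cases h1 : PySem.Str.lower c ∈ pvExactNames
    · simp [pvAltLoop, pvLoop1, h1]
    · by_cases h2 : PySem.Chars.isIn ['g', 'a', 'u', 'g', 'e'] (PySem.Chars.lower c.toList) = true ∨
          PySem.Chars.isIn ['g', 'a', 'g', 'e'] (PySem.Chars.lower c.toList) = true
      · cases fb <;> cases hL : pvLoop1 rest <;>
          simp [pvAltLoop, pvLoop1, pvLoop2, h1, h2, ih, hL]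
      · cases fb <;> cases hL : pvLoop1 rest <;>
          simp [pvAltLoop, pvLoop1, pvLoop2, h1, h2, ih, hL]

-- ===== VERDICT (by name: the statement is the Claim_ definition above) =====
theorem detect_station_id_col_py_spec : Claim_equal_detect_station_id_col_py := by
  intro columns _
  unfold Spec_detect_station_id_col_py detect_station_id_col_py detect_station_id_col_py_alt
  rw [pvAltLoop_eq]
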